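-- pv_equiv track=rewrite | github.com/bernardo1mw/CFA | backend/app/services/anpr_service.py | corrigir_caracteres_similares
-- ===== SOURCE A (Python) =====
-- def corrigir_caracteres_similares(texto: str) -> str:
--     """
--     Corrige caracteres frequentemente confundidos pelo OCR em placas.
--     Mantido para compatibilidade, mas FastALPR já tem correções internas.
--
--     Args:
--         texto: Texto da placa reconhecida
--
--     Returns:
--         str: Texto corrigido
--     """
--     if not texto:
--         return texto
--
--     # Mapeamento de correções comuns em placas brasileiras
--     correcoes = {
--         'O': '0', 'I': '1', 'Z': '2', 'S': '5', 'G': '6', 'B': '8'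
--     }
--
--     texto_corrigido = ""
--     for i, char in enumerate(texto):
--         if len(texto) == 7:  # Placas brasileiras têm 7 caracteres
--             if i < 3:  # Primeiras 3 posições são letras
--                 if char.isdigit():
--                     inv_map = {'0': 'O', '1': 'I', '2': 'Z', '5': 'S', '6': 'G', '8': 'B'}
--                     char = inv_map.get(char, char)
--             elif i == 3 or i >= 5:  # Posições de números
--                 if char.isalpha():
--                     char = correcoes.get(char, char)
--
--         texto_corrigido += char
--
--     return texto_corrigido
-- ===== SOURCE B (Python) =====
-- # B: segment-based rewrite — process the 7-char plate as labelled slices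
-- # (letters / digit / free / digits) instead of one loop branching on the index.
--
-- NUM_TO_LETRA = {'0': 'O', '1': 'I', '2': 'Z', '5': 'S', '6': 'G', '8': 'B'}
-- LETRA_TO_NUM = {'O': '0', 'I': '1', 'Z': '2', 'S': '5', 'G': '6', 'B': '8'}
--
--
-- def corrigir_caracteres_similares(texto: str) -> str:
--     if len(texto) != 7:
--         return texto
--     letras = ''.join(NUM_TO_LETRA.get(c, c) if c.isdigit() else c
--                      for c in texto[:3])
--     meio = LETRA_TO_NUM.get(texto[3], texto[3]) if texto[3].isalpha() else texto[3]
--     fim = ''.join(LETRA_TO_NUM.get(c, c) if c.isalpha() else c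
--                   for c in texto[5:7])
--     return letras + meio + texto[4] + fim
-- ===== Notes on version B (the rewrite author's own statement) =====
-- stated objective: simpler
-- what changed: Replaced the single enumerate loop that re-checks len(texto)==7 and branches on the index at every character (accumulating with quadratic string +=) by an early return for non-7-length input plus a slice-based build of the four labelled plate segments (letters / digit / free char / digits) joined linearly from two fixed top-level dicts.
import Mathlib
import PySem

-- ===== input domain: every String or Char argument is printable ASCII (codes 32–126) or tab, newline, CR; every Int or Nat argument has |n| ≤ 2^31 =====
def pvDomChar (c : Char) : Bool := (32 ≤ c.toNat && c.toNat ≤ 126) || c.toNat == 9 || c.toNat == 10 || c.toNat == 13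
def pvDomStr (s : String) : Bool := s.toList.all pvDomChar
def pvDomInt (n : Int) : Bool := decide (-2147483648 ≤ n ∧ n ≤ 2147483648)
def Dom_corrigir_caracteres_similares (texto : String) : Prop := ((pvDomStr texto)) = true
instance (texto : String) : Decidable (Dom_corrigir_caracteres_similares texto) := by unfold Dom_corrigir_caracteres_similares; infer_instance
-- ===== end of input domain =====

-- B replaces A's per-index-branching loop by an early return plus a slice/segment build; objective: simpler.

-- ===== PORT A =====
-- A's per-character loop: re-checks len(texto)==7 each iteration and branches on the index.
def corrigir_caracteres_similares (texto : String) : String :=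
  if texto = "" then texto
  else
    let correcoes : PySem.Dict Char Char :=
      PySem.Dict.ofList [('O', '0'), ('I', '1'), ('Z', '2'), ('S', '5'), ('G', '6'), ('B', '8')]
    let cs := texto.toList
    let out := (PySem.List.enumerate cs 0).foldl (fun acc p =>
      let i := p.1
      let char := p.2
      let char :=
        if cs.length = 7 then
          if i < 3 then
            if PySem.Chars.isdigit char then
              (PySem.Dict.ofList [('0', 'O'), ('1', 'I'), ('2', 'Z'), ('5', 'S'), ('6', 'G'), ('8', 'B')]).getD char char
            else char
          else if i = 3 ∨ i ≥ 5 then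
            if PySem.Chars.isalpha char then correcoes.getD char char else char
          else char
        else char
      acc ++ [char]) []
    String.ofList out

-- ===== PORT B =====
def pvNumToLetra : PySem.Dict Char Char :=
  PySem.Dict.ofList [('0', 'O'), ('1', 'I'), ('2', 'Z'), ('5', 'S'), ('6', 'G'), ('8', 'B')]
def pvLetraToNum : PySem.Dict Char Char :=
  PySem.Dict.ofList [('O', '0'), ('I', '1'), ('Z', '2'), ('S', '5'), ('G', '6'), ('B', '8')]

def corrigir_caracteres_similares_alt (texto : String) : String :=
  let cs := texto.toList
  if cs.length ≠ 7 then texto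
  else
    let letras := (PySem.List.slice cs none (some 3)).map
      (fun c => if PySem.Chars.isdigit c then pvNumToLetra.getD c c else c)
    let c3 := PySem.List.pyGetD cs 3 ' '
    let meio := if PySem.Chars.isalpha c3 then pvLetraToNum.getD c3 c3 else c3
    let c4 := PySem.List.pyGetD cs 4 ' '
    let fim := (PySem.List.slice cs (some 5) (some 7)).map
      (fun c => if PySem.Chars.isalpha c then pvLetraToNum.getD c c else c)
    String.ofList (letras ++ [meio] ++ [c4] ++ fim)

-- ===== PRECONDITION & SPEC =====
def Spec_corrigir_caracteres_similares (texto : String) (out : String) : Prop := out = corrigir_caracteres_similares_alt texto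
instance (texto : String) (out : String) : Decidable (Spec_corrigir_caracteres_similares texto out) := by unfold Spec_corrigir_caracteres_similares; infer_instance

-- ===== CLAIM (what is proved, stated in full; the proofs are below) =====
def Claim_equal_corrigir_caracteres_similares : Prop := ∀ (texto : String), Dom_corrigir_caracteres_similares texto → Spec_corrigir_caracteres_similares texto (corrigir_caracteres_similares texto)

-- ===== LEMMAS AND PROOFS =====

theorem pv_foldl_append_singleton {α β : Type} (g : α → β) (l : List α) (a : List β) :
    l.foldl (fun acc p => acc ++ [g p]) a = a ++ l.map g := by
  induction l generalizing a with
  | nil => simp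
  | cons x xs ih => simp [List.foldl, ih]

-- ===== VERDICT (by name: the statement is the Claim_ definition above) =====
theorem corrigir_caracteres_similares_spec : Claim_equal_corrigir_caracteres_similares := by
  intro texto _
  show corrigir_caracteres_similares texto = corrigir_caracteres_similares_alt texto
  by_cases h7 : texto.toList.length = 7
  · have hne : texto ≠ "" := by
      intro h; rw [h] at h7; simp at h7
    obtain ⟨a, b, c, d, e, f, g, hl⟩ :
        ∃ a b c d e f g, texto.toList = [a, b, c, d, e, f, g] := by
      match hl : texto.toList, h7 with
      | [a, b, c, d, e, f, g], _ => exact ⟨a, b, c, d, e, f, g, rfl⟩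
    simp only [corrigir_caracteres_similares, corrigir_caracteres_similares_alt, hl,
      if_neg hne]
    simp [PySem.List.enumerate, PySem.List.slice, pvNumToLetra, pvLetraToNum,
      PySem.List.pyGetD]
  · simp only [corrigir_caracteres_similares, corrigir_caracteres_similares_alt,
      ne_eq, h7, not_false_eq_true, if_pos]
    split
    · rfl
    · rw [pv_foldl_append_singleton]
      simp [PySem.List.map_snd_enumerate]
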